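-- pv_equiv track=rewrite | github.com/Wamedina/Tesis-Magister | Backup Codes/SUBTE/Preparacion_S.py | Generador_lista_matriz
-- ===== SOURCE A (Python) =====
-- def Generador_lista_matriz (Y_VAR,dp_cords,distancia_x,distancia_y,distancia_z,limites_x,limites_y,limites_z):
--     lista_final_1 = []
--     dp = 0
--     for i in Y_VAR:
--         if i > 0:
--             for j in range(i):
--                 coordenada = [dp_cords[dp][0],dp_cords[dp][1],dp_cords[dp][2]+j]
--                 lista_final_1.append(coordenada)
--         dp += 1
--
--     ## Se escalará la variable a continuación
--     lista_final_2 = []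
--     for i in lista_final_1:
--         for x in range(2):
--             for y in range(3):
--                 valor_x = i[0]*2 + x - (distancia_x//limites_x[0])
--                 valor_y = i[1]*3 + y - (distancia_y//limites_y[0])
--                 valor_z = i[2] - (distancia_z//limites_z[0])
--
--                 coordenada_final = [valor_x,valor_y,valor_z]
--                 lista_final_2.append(coordenada_final)
--     return lista_final_2
-- ===== SOURCE B (Python) =====
-- def Generador_lista_matriz(Y_VAR, dp_cords, distancia_x, distancia_y, distancia_z,
--                            limites_x, limites_y, limites_z):
--     out = []
--     for dp, cnt in enumerate(Y_VAR):
--         if cnt <= 0: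
--             continue
--         px, py, pz = dp_cords[dp]
--         bx = px * 2 - distancia_x // limites_x[0]
--         by = py * 3 - distancia_y // limites_y[0]
--         bz = pz - distancia_z // limites_z[0]
--         out.extend([bx + x, by + y, bz + j]
--                    for j in range(cnt) for x in range(2) for y in range(3))
--     return out
-- ===== Notes on version B (the rewrite author's own statement) =====
-- stated objective: simpler
-- what changed: Replaces A's two-phase build-intermediate-list-then-rescan with a single fused pass over enumerate(Y_VAR) that hoists the three scaling offsets per entry and extends the result with a comprehension.
import Mathlib
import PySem

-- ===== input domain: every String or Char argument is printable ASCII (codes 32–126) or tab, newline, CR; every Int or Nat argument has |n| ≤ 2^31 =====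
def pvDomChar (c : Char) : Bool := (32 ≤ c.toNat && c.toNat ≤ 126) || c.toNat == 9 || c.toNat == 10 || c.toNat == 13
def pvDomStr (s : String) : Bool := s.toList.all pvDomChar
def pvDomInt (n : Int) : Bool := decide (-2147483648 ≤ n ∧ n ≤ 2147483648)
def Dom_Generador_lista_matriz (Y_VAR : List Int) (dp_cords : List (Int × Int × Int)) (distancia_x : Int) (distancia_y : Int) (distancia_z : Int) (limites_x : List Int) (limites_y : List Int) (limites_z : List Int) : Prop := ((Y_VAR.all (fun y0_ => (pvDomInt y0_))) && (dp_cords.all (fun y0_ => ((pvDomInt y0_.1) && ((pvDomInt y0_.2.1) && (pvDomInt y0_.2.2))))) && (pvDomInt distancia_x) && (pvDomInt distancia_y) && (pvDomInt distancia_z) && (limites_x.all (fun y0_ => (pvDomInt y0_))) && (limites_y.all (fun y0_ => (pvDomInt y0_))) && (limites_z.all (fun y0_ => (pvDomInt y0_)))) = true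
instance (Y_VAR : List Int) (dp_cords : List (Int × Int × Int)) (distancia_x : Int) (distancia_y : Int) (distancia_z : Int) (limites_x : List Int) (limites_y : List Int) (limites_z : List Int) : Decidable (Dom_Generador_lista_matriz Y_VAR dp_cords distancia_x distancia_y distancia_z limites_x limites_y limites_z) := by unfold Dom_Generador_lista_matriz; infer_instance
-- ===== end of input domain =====

-- B fuses A's two phases (expand, then rescan-and-scale) into one pass over enumerate(Y_VAR),
-- hoisting the scaling offsets per entry; same return value (objective: simpler).

-- ===== PORT A =====
def Generador_lista_matriz (Y_VAR : List Int) (dp_cords : List (Int × Int × Int)) (distancia_x : Int) (distancia_y : Int) (distancia_z : Int) (limites_x : List Int) (limites_y : List Int) (limites_z : List Int) : List (List Int) :=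
  -- phase 1: build lista_final_1 while counting dp
  let s := Y_VAR.foldl (fun (st : List (List Int) × Int) i =>
    let l1 := if 0 < i then
        (PySem.List.pyRange 0 i 1).foldl (fun acc j =>
          let c := PySem.List.pyGetD dp_cords st.2 (0, 0, 0)
          acc ++ [[c.1, c.2.1, c.2.2 + j]]) st.1
      else st.1
    (l1, st.2 + 1)) ([], 0)
  -- phase 2: rescan and scale
  s.1.foldl (fun l2 i =>
    (PySem.List.pyRange 0 2 1).foldl (fun l2 x =>
      (PySem.List.pyRange 0 3 1).foldl (fun l2 y =>
        let vx := PySem.List.pyGetD i 0 0 * 2 + x - PySem.Int.floordiv distancia_x (PySem.List.pyGetD limites_x 0 0)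
        let vy := PySem.List.pyGetD i 1 0 * 3 + y - PySem.Int.floordiv distancia_y (PySem.List.pyGetD limites_y 0 0)
        let vz := PySem.List.pyGetD i 2 0 - PySem.Int.floordiv distancia_z (PySem.List.pyGetD limites_z 0 0)
        l2 ++ [[vx, vy, vz]]) l2) l2) []

-- ===== PORT B =====
def Generador_lista_matriz_alt (Y_VAR : List Int) (dp_cords : List (Int × Int × Int)) (distancia_x : Int) (distancia_y : Int) (distancia_z : Int) (limites_x : List Int) (limites_y : List Int) (limites_z : List Int) : List (List Int) :=
  (PySem.List.enumerate Y_VAR 0).foldl (fun out dc =>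
    if dc.2 ≤ 0 then out
    else
      let p := PySem.List.pyGetD dp_cords dc.1 (0, 0, 0)
      let bx := p.1 * 2 - PySem.Int.floordiv distancia_x (PySem.List.pyGetD limites_x 0 0)
      let by_ := p.2.1 * 3 - PySem.Int.floordiv distancia_y (PySem.List.pyGetD limites_y 0 0)
      let bz := p.2.2 - PySem.Int.floordiv distancia_z (PySem.List.pyGetD limites_z 0 0)
      out ++ (PySem.List.pyRange 0 dc.2 1).flatMap (fun j =>
        (PySem.List.pyRange 0 2 1).flatMap (fun x =>
          (PySem.List.pyRange 0 3 1).map (fun y => [bx + x, by_ + y, bz + j])))) []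

-- ===== PRECONDITION & SPEC =====
-- Pre_ excludes exactly the inputs where the Python raises: a positive Y_VAR entry whose index
-- has no dp_cords coordinate (IndexError), and, when any entry is positive, an empty limites list
-- (IndexError) or a zero first limit (ZeroDivisionError).
def Pre_Generador_lista_matriz (Y_VAR : List Int) (dp_cords : List (Int × Int × Int)) (distancia_x : Int) (distancia_y : Int) (distancia_z : Int) (limites_x : List Int) (limites_y : List Int) (limites_z : List Int) : Prop :=
  (∀ k : Nat, k < Y_VAR.length → 0 < Y_VAR.getD k 0 → k < dp_cords.length) ∧
  ((∃ i ∈ Y_VAR, 0 < i) →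
    limites_x ≠ [] ∧ limites_y ≠ [] ∧ limites_z ≠ [] ∧
    limites_x.headD 0 ≠ 0 ∧ limites_y.headD 0 ≠ 0 ∧ limites_z.headD 0 ≠ 0)
instance (Y_VAR : List Int) (dp_cords : List (Int × Int × Int)) (distancia_x : Int) (distancia_y : Int) (distancia_z : Int) (limites_x : List Int) (limites_y : List Int) (limites_z : List Int) : Decidable (Pre_Generador_lista_matriz Y_VAR dp_cords distancia_x distancia_y distancia_z limites_x limites_y limites_z) := by unfold Pre_Generador_lista_matriz; infer_instance
def pvWitness_Generador_lista_matriz : List Int × (List (Int × Int × Int)) × Int × Int × Int × List Int × List Int × List Int :=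
  ([2, 0, 1], [(1, -1, 0), (0, 0, 0), (2, 1, 3)], 7, -4, 5, [2], [3, 9], [-2])

def Spec_Generador_lista_matriz (Y_VAR : List Int) (dp_cords : List (Int × Int × Int)) (distancia_x : Int) (distancia_y : Int) (distancia_z : Int) (limites_x : List Int) (limites_y : List Int) (limites_z : List Int) (out : List (List Int)) : Prop := out = Generador_lista_matriz_alt Y_VAR dp_cords distancia_x distancia_y distancia_z limites_x limites_y limites_z
instance (Y_VAR : List Int) (dp_cords : List (Int × Int × Int)) (distancia_x : Int) (distancia_y : Int) (distancia_z : Int) (limites_x : List Int) (limites_y : List Int) (limites_z : List Int) (out : List (List Int)) : Decidable (Spec_Generador_lista_matriz Y_VAR dp_cords distancia_x distancia_y distancia_z limites_x limites_y limites_z out) := by unfold Spec_Generador_lista_matriz; infer_instance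

-- ===== CLAIM (what is proved, stated in full; the proofs are below) =====
def Claim_equal_Generador_lista_matriz : Prop := ∀ (Y_VAR : List Int) (dp_cords : List (Int × Int × Int)) (distancia_x : Int) (distancia_y : Int) (distancia_z : Int) (limites_x : List Int) (limites_y : List Int) (limites_z : List Int), Dom_Generador_lista_matriz Y_VAR dp_cords distancia_x distancia_y distancia_z limites_x limites_y limites_z → Pre_Generador_lista_matriz Y_VAR dp_cords distancia_x distancia_y distancia_z limites_x limites_y limites_z → Spec_Generador_lista_matriz Y_VAR dp_cords distancia_x distancia_y distancia_z limites_x limites_y limites_z (Generador_lista_matriz Y_VAR dp_cords distancia_x distancia_y distancia_z limites_x limites_y limites_z)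

-- ===== LEMMAS AND PROOFS =====

-- A's phase-1 foldl builds exactly the flatMap of per-entry expanded coordinates.
theorem pvPhase1 (dp_cords : List (Int × Int × Int)) (Y : List Int) (acc : List (List Int)) (dp0 : Int) :
    (Y.foldl (fun (st : List (List Int) × Int) i =>
      let l1 := if 0 < i then
          (PySem.List.pyRange 0 i 1).foldl (fun acc j =>
            let c := PySem.List.pyGetD dp_cords st.2 (0, 0, 0)
            acc ++ [[c.1, c.2.1, c.2.2 + j]]) st.1
        else st.1
      (l1, st.2 + 1)) (acc, dp0)).1
    = acc ++ (PySem.List.enumerate Y dp0).flatMap (fun dc =>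
        if 0 < dc.2 then
          (PySem.List.pyRange 0 dc.2 1).map (fun j =>
            [(PySem.List.pyGetD dp_cords dc.1 (0, 0, 0)).1,
             (PySem.List.pyGetD dp_cords dc.1 (0, 0, 0)).2.1,
             (PySem.List.pyGetD dp_cords dc.1 (0, 0, 0)).2.2 + j])
        else []) := by
  induction Y generalizing acc dp0 with
  | nil => simp [PySem.List.enumerate_nil]
  | cons i Y ih =>
    simp only [List.foldl_cons, PySem.List.enumerate_cons, List.flatMap_cons]
    by_cases h : 0 < i
    · simp only [h, if_pos]
      rw [PySem.List.foldl_append_singleton_eq_map, ih, List.append_assoc]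
    · simp only [h, if_neg, not_false_iff]
      rw [ih]
      simp

-- A's phase-2 inner x/y loops on one base coordinate, as an explicit six-element block.
theorem pvInner23 (ox oy oz : Int) (i : List Int) (l2 : List (List Int)) :
    (PySem.List.pyRange 0 2 1).foldl (fun l2 x =>
      (PySem.List.pyRange 0 3 1).foldl (fun l2 y =>
        l2 ++ [[PySem.List.pyGetD i 0 0 * 2 + x - ox,
                PySem.List.pyGetD i 1 0 * 3 + y - oy,
                PySem.List.pyGetD i 2 0 - oz]]) l2) l2
    = l2 ++ [[PySem.List.pyGetD i 0 0 * 2 + 0 - ox, PySem.List.pyGetD i 1 0 * 3 + 0 - oy, PySem.List.pyGetD i 2 0 - oz],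
             [PySem.List.pyGetD i 0 0 * 2 + 0 - ox, PySem.List.pyGetD i 1 0 * 3 + 1 - oy, PySem.List.pyGetD i 2 0 - oz],
             [PySem.List.pyGetD i 0 0 * 2 + 0 - ox, PySem.List.pyGetD i 1 0 * 3 + 2 - oy, PySem.List.pyGetD i 2 0 - oz],
             [PySem.List.pyGetD i 0 0 * 2 + 1 - ox, PySem.List.pyGetD i 1 0 * 3 + 0 - oy, PySem.List.pyGetD i 2 0 - oz],
             [PySem.List.pyGetD i 0 0 * 2 + 1 - ox, PySem.List.pyGetD i 1 0 * 3 + 1 - oy, PySem.List.pyGetD i 2 0 - oz],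
             [PySem.List.pyGetD i 0 0 * 2 + 1 - ox, PySem.List.pyGetD i 1 0 * 3 + 2 - oy, PySem.List.pyGetD i 2 0 - oz]] := by
  have h2 : PySem.List.pyRange 0 2 1 = [0, 1] := by decide
  have h3 : PySem.List.pyRange 0 3 1 = [0, 1, 2] := by decide
  rw [h2, h3]
  simp [List.foldl, List.append_assoc]

-- The two ports agree on every input.
theorem pvPortsEq (Y_VAR : List Int) (dp_cords : List (Int × Int × Int)) (distancia_x : Int) (distancia_y : Int) (distancia_z : Int) (limites_x : List Int) (limites_y : List Int) (limites_z : List Int) :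
    Generador_lista_matriz Y_VAR dp_cords distancia_x distancia_y distancia_z limites_x limites_y limites_z
    = Generador_lista_matriz_alt Y_VAR dp_cords distancia_x distancia_y distancia_z limites_x limites_y limites_z := by
  simp only [Generador_lista_matriz, Generador_lista_matriz_alt]
  rw [pvPhase1]
  rw [PySem.List.foldl_congr_mem _ _
    (fun (l2 : List (List Int)) (i : List Int) => l2 ++
      [[PySem.List.pyGetD i 0 0 * 2 + 0 - PySem.Int.floordiv distancia_x (PySem.List.pyGetD limites_x 0 0), PySem.List.pyGetD i 1 0 * 3 + 0 - PySem.Int.floordiv distancia_y (PySem.List.pyGetD limites_y 0 0), PySem.List.pyGetD i 2 0 - PySem.Int.floordiv distancia_z (PySem.List.pyGetD limites_z 0 0)],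
       [PySem.List.pyGetD i 0 0 * 2 + 0 - PySem.Int.floordiv distancia_x (PySem.List.pyGetD limites_x 0 0), PySem.List.pyGetD i 1 0 * 3 + 1 - PySem.Int.floordiv distancia_y (PySem.List.pyGetD limites_y 0 0), PySem.List.pyGetD i 2 0 - PySem.Int.floordiv distancia_z (PySem.List.pyGetD limites_z 0 0)],
       [PySem.List.pyGetD i 0 0 * 2 + 0 - PySem.Int.floordiv distancia_x (PySem.List.pyGetD limites_x 0 0), PySem.List.pyGetD i 1 0 * 3 + 2 - PySem.Int.floordiv distancia_y (PySem.List.pyGetD limites_y 0 0), PySem.List.pyGetD i 2 0 - PySem.Int.floordiv distancia_z (PySem.List.pyGetD limites_z 0 0)],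
       [PySem.List.pyGetD i 0 0 * 2 + 1 - PySem.Int.floordiv distancia_x (PySem.List.pyGetD limites_x 0 0), PySem.List.pyGetD i 1 0 * 3 + 0 - PySem.Int.floordiv distancia_y (PySem.List.pyGetD limites_y 0 0), PySem.List.pyGetD i 2 0 - PySem.Int.floordiv distancia_z (PySem.List.pyGetD limites_z 0 0)],
       [PySem.List.pyGetD i 0 0 * 2 + 1 - PySem.Int.floordiv distancia_x (PySem.List.pyGetD limites_x 0 0), PySem.List.pyGetD i 1 0 * 3 + 1 - PySem.Int.floordiv distancia_y (PySem.List.pyGetD limites_y 0 0), PySem.List.pyGetD i 2 0 - PySem.Int.floordiv distancia_z (PySem.List.pyGetD limites_z 0 0)],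
       [PySem.List.pyGetD i 0 0 * 2 + 1 - PySem.Int.floordiv distancia_x (PySem.List.pyGetD limites_x 0 0), PySem.List.pyGetD i 1 0 * 3 + 2 - PySem.Int.floordiv distancia_y (PySem.List.pyGetD limites_y 0 0), PySem.List.pyGetD i 2 0 - PySem.Int.floordiv distancia_z (PySem.List.pyGetD limites_z 0 0)]])
    _ (by intro acc x _; exact pvInner23 _ _ _ _ _)]
  rw [PySem.List.foldl_append_eq_flatMap]
  rw [PySem.List.foldl_congr_mem _ _
    (fun (out : List (List Int)) (dc : Int × Int) => out ++
      (if dc.2 ≤ 0 then [] else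
        (PySem.List.pyRange 0 dc.2 1).flatMap (fun j =>
          (PySem.List.pyRange 0 2 1).flatMap (fun x =>
            (PySem.List.pyRange 0 3 1).map (fun y =>
              [(PySem.List.pyGetD dp_cords dc.1 (0, 0, 0)).1 * 2 - PySem.Int.floordiv distancia_x (PySem.List.pyGetD limites_x 0 0) + x,
               (PySem.List.pyGetD dp_cords dc.1 (0, 0, 0)).2.1 * 3 - PySem.Int.floordiv distancia_y (PySem.List.pyGetD limites_y 0 0) + y,
               (PySem.List.pyGetD dp_cords dc.1 (0, 0, 0)).2.2 - PySem.Int.floordiv distancia_z (PySem.List.pyGetD limites_z 0 0) + j])))))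
    _ (by intro acc x _; by_cases h : x.2 ≤ 0 <;> simp [h])]
  rw [PySem.List.foldl_append_eq_flatMap]
  simp only [List.nil_append, List.flatMap_assoc]
  congr 1
  funext dc
  by_cases h : 0 < dc.2
  · rw [if_pos h, if_neg (by omega)]
    rw [List.flatMap_map]
    congr 1
    funext j
    have h2 : PySem.List.pyRange 0 2 1 = [0, 1] := by decide
    have h3 : PySem.List.pyRange 0 3 1 = [0, 1, 2] := by decide
    rw [h2, h3]
    simp [PySem.List.pyGetD, PySem.List.pyGet?, PySem.List.pyIdx?]
    omega
  · rw [if_neg h, if_pos (by omega)]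
    simp

-- ===== VERDICT (by name: the statement is the Claim_ definition above) =====
theorem Generador_lista_matriz_spec : Claim_equal_Generador_lista_matriz := by
  intro Y_VAR dp_cords dx dy dz lx ly lz _ _
  unfold Spec_Generador_lista_matriz
  exact pvPortsEq Y_VAR dp_cords dx dy dz lx ly lz
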